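-- pv_equiv track=rewrite | github.com/mvjacobs/Crone | CrowdProcessor/Distributions/ArticleOutputter.py | get_features_articles
-- ===== SOURCE A (Python) =====
-- def get_features_articles(articles, article_number, credible='1'):
--     comments = [article['article_comments_count%d' % article_number] for article in articles if article['result_article_comments_count%d' % article_number] == credible]
--     keywords = [article['article_keywords_count%d' % article_number] for article in articles if article['result_article_keywords_count%d' % article_number] == credible]
--     nouns = [article['article_nouns_count%d' % article_number] for article in articles if article['result_article_nouns_count%d' % article_number] == credible]
--     numbers = [article['article_numerical_count%d' % article_number] for article in articles if article['result_article_numerical_count%d' % article_number] == credible]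
--     punctuations = [article['article_punctuation_count%d' % article_number] for article in articles if article['result_article_punctuation_count%d' % article_number] == credible]
--     uppercases = [article['article_uppercase_count%d' % article_number] for article in articles if article['result_article_uppercase_count%d' % article_number] == credible]
--     entities = [article['article_wiki_entities_count%d' % article_number] for article in articles if article['result_article_wiki_entities_count%d' % article_number] == credible]
--     words = [article['article_word_count%d' % article_number] for article in articles if article['result_article_word_count%d' % article_number] == credible]
--     sentiments = [article['sentiment%d' % article_number] for article in articles if article['result_sentiment%d' % article_number] == credible]
--
--     return [comments, keywords, nouns, numbers, punctuations, uppercases, entities, words, sentiments]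
-- ===== SOURCE B (Python) =====
-- def get_features_articles(articles, article_number, credible='1'):
--     fields = ['article_comments_count', 'article_keywords_count', 'article_nouns_count',
--               'article_numerical_count', 'article_punctuation_count', 'article_uppercase_count',
--               'article_wiki_entities_count', 'article_word_count', 'sentiment']
--     out = [[] for _ in fields]
--     for article in articles:
--         for lst, f in zip(out, fields):
--             if article['result_%s%d' % (f, article_number)] == credible:
--                 lst.append(article['%s%d' % (f, article_number)])
--     return out
-- ===== Notes on version B (the rewrite author's own statement) =====
-- stated objective: alternative
-- what changed: Replaces nine separate list-comprehension scans of articles (one per field) with a single pass that appends each matching value into nine accumulator lists.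
import Mathlib
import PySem

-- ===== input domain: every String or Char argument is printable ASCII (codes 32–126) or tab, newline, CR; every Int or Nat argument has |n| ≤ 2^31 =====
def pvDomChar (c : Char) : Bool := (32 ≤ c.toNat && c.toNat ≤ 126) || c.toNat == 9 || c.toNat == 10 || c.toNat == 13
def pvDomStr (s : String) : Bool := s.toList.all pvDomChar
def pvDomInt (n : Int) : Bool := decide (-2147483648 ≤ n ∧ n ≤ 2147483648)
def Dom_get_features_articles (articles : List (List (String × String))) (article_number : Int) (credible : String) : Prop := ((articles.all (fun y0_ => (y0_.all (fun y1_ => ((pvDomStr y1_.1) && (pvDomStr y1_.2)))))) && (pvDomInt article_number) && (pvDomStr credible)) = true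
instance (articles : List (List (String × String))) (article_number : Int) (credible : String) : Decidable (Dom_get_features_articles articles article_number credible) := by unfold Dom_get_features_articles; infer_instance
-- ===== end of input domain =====

-- B fuses A's nine separate scans of `articles` into a single pass that appends into nine
-- accumulator lists (objective: alternative/simpler single traversal; same asymptotic cost).
-- Python A raises KeyError on dicts missing a looked-up key; exactly those inputs are outside Pre_.

-- ===== PORT A =====
-- dict lookup article[k] (first match); Pre_ guarantees the key is present wherever it is fetched
def pvGetS (a : List (String × String)) (k : String) : String := (List.lookup k a).getD ""

def get_features_articles (articles : List (List (String × String))) (article_number : Int) (credible : String) : List (List String) :=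
  let s := PySem.Int.toStr article_number
  let comments := (articles.filter (fun a => pvGetS a ("result_article_comments_count" ++ s) == credible)).map (fun a => pvGetS a ("article_comments_count" ++ s))
  let keywords := (articles.filter (fun a => pvGetS a ("result_article_keywords_count" ++ s) == credible)).map (fun a => pvGetS a ("article_keywords_count" ++ s))
  let nouns := (articles.filter (fun a => pvGetS a ("result_article_nouns_count" ++ s) == credible)).map (fun a => pvGetS a ("article_nouns_count" ++ s))
  let numbers := (articles.filter (fun a => pvGetS a ("result_article_numerical_count" ++ s) == credible)).map (fun a => pvGetS a ("article_numerical_count" ++ s))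
  let punctuations := (articles.filter (fun a => pvGetS a ("result_article_punctuation_count" ++ s) == credible)).map (fun a => pvGetS a ("article_punctuation_count" ++ s))
  let uppercases := (articles.filter (fun a => pvGetS a ("result_article_uppercase_count" ++ s) == credible)).map (fun a => pvGetS a ("article_uppercase_count" ++ s))
  let entities := (articles.filter (fun a => pvGetS a ("result_article_wiki_entities_count" ++ s) == credible)).map (fun a => pvGetS a ("article_wiki_entities_count" ++ s))
  let words := (articles.filter (fun a => pvGetS a ("result_article_word_count" ++ s) == credible)).map (fun a => pvGetS a ("article_word_count" ++ s))
  let sentiments := (articles.filter (fun a => pvGetS a ("result_sentiment" ++ s) == credible)).map (fun a => pvGetS a ("sentiment" ++ s))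
  [comments, keywords, nouns, numbers, punctuations, uppercases, entities, words, sentiments]

-- ===== PORT B =====
def pvFields : List String :=
  ["article_comments_count", "article_keywords_count", "article_nouns_count",
   "article_numerical_count", "article_punctuation_count", "article_uppercase_count",
   "article_wiki_entities_count", "article_word_count", "sentiment"]

-- the body of B's inner `for lst, f in zip(out, fields)` loop, over one article
def pvStep (s credible : String) (out : List (List String)) (a : List (String × String)) : List (List String) :=
  (out.zip pvFields).map (fun p =>
    if pvGetS a ("result_" ++ p.2 ++ s) == credible then p.1 ++ [pvGetS a (p.2 ++ s)] else p.1)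

def get_features_articles_alt (articles : List (List (String × String))) (article_number : Int) (credible : String) : List (List String) :=
  let s := PySem.Int.toStr article_number
  articles.foldl (pvStep s credible) (pvFields.map (fun _ => []))

-- ===== PRECONDITION & SPEC =====
-- Pre_ excludes exactly the inputs on which Python A raises KeyError: some article lacks one of
-- the nine result_* keys, or lacks a value key whose result_* flag equals `credible`.
def Pre_get_features_articles (articles : List (List (String × String))) (article_number : Int) (credible : String) : Prop :=
  ∀ a ∈ articles, ∀ f ∈ pvFields,
    (List.lookup ("result_" ++ f ++ PySem.Int.toStr article_number) a).isSome = true ∧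
    (List.lookup ("result_" ++ f ++ PySem.Int.toStr article_number) a = some credible →
      (List.lookup (f ++ PySem.Int.toStr article_number) a).isSome = true)
instance (articles : List (List (String × String))) (article_number : Int) (credible : String) : Decidable (Pre_get_features_articles articles article_number credible) := by unfold Pre_get_features_articles; infer_instance

def pvWitness_get_features_articles : (List (List (String × String))) × Int × String :=
  ([[("result_article_comments_count2", "1"), ("article_comments_count2", "5"),
     ("result_article_keywords_count2", "0"), ("result_article_nouns_count2", "0"),
     ("result_article_numerical_count2", "0"), ("result_article_punctuation_count2", "0"),
     ("result_article_uppercase_count2", "0"), ("result_article_wiki_entities_count2", "0"),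
     ("result_article_word_count2", "0"), ("result_sentiment2", "0")]], 2, "1")

def Spec_get_features_articles (articles : List (List (String × String))) (article_number : Int) (credible : String) (out : List (List String)) : Prop := out = get_features_articles_alt articles article_number credible
instance (articles : List (List (String × String))) (article_number : Int) (credible : String) (out : List (List String)) : Decidable (Spec_get_features_articles articles article_number credible out) := by unfold Spec_get_features_articles; infer_instance

-- ===== CLAIM (what is proved, stated in full; the proofs are below) =====
def Claim_equal_get_features_articles : Prop := ∀ (articles : List (List (String × String))) (article_number : Int) (credible : String), Dom_get_features_articles articles article_number credible → Pre_get_features_articles articles article_number credible → Spec_get_features_articles articles article_number credible (get_features_articles articles article_number credible)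

-- ===== LEMMAS AND PROOFS =====

-- what B accumulates for one field = the corresponding comprehension of A
def pvPick (s credible f : String) (articles : List (List (String × String))) : List String :=
  (articles.filter (fun a => pvGetS a ("result_" ++ f ++ s) == credible)).map (fun a => pvGetS a (f ++ s))

lemma pvPick_cons (s cred f : String) (a : List (String × String)) (as : List (List (String × String))) :
    pvPick s cred f (a :: as) =
      if pvGetS a ("result_" ++ f ++ s) == cred then pvGetS a (f ++ s) :: pvPick s cred f as
      else pvPick s cred f as := by
  simp only [pvPick, List.filter_cons]
  split <;> simp

lemma pv_app_if (c : Bool) (l P : List String) (v : String) :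
    (if c then l ++ [v] else l) ++ P = l ++ (if c then v :: P else P) := by
  cases c <;> simp

lemma pv_fold_inv (s credible : String) (articles : List (List (String × String)))
    (l1 l2 l3 l4 l5 l6 l7 l8 l9 : List String) :
    articles.foldl (pvStep s credible) [l1, l2, l3, l4, l5, l6, l7, l8, l9] =
      [l1 ++ pvPick s credible "article_comments_count" articles,
       l2 ++ pvPick s credible "article_keywords_count" articles,
       l3 ++ pvPick s credible "article_nouns_count" articles,
       l4 ++ pvPick s credible "article_numerical_count" articles,
       l5 ++ pvPick s credible "article_punctuation_count" articles,
       l6 ++ pvPick s credible "article_uppercase_count" articles,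
       l7 ++ pvPick s credible "article_wiki_entities_count" articles,
       l8 ++ pvPick s credible "article_word_count" articles,
       l9 ++ pvPick s credible "sentiment" articles] := by
  induction articles generalizing l1 l2 l3 l4 l5 l6 l7 l8 l9 with
  | nil => simp [pvPick]
  | cons a as ih =>
    simp only [List.foldl_cons, pvStep, pvFields, List.zip, List.zipWith, List.map_cons,
      List.map_nil]
    rw [ih]
    simp only [pvPick_cons, pv_app_if]

-- ===== VERDICT (by name: the statement is the Claim_ definition above) =====
theorem get_features_articles_spec : Claim_equal_get_features_articles := by
  intro articles article_number credible _ _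
  unfold Spec_get_features_articles get_features_articles get_features_articles_alt
  simp only [pvFields, List.map_cons, List.map_nil]
  rw [pv_fold_inv]
  simp [pvPick]
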